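-- pv_equiv track=rewrite | github.com/jvznx07/Projeto-Sudoku- | sudoku/verificadores.py | verifica_linhas
-- ===== SOURCE A (Python) =====
-- def verifica_linhas(pos_preenchidas):
--     """Verifica se uma linha não tem números repetidos."""
--
--     # Percorre cada linha
--     for linha in range(9):
--         # uma lista não ordenada de valores vistos(conjunto)
--         val_vistos = set()
--         # vai percorrer todo o pos_preenchida e o item assume o valor da lista inserida no pos_preenchidas
--         for item in pos_preenchidas:
--             # verifica se o número da linha corresponde ao atual verificado no laço
--             if item[1] == linha:
--                 valor = item[2]
--                 # se o valor já estiver sido adicionado, a função retorna False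
--                 if valor in val_vistos:
--                     return False
--
--                 # Adiciona o valor ao conjunto val_vistos
--                 val_vistos.add(valor)
--     return True
-- ===== SOURCE B (Python) =====
-- def verifica_linhas(pos_preenchidas):
--     """Verifica se uma linha nao tem numeros repetidos (uma unica passagem)."""
--     vistos = {}
--     for item in pos_preenchidas:
--         if 0 <= item[1] < 9:
--             s = vistos.setdefault(item[1], set())
--             if item[2] in s:
--                 return False
--             s.add(item[2])
--     return True
-- ===== Notes on version B (the rewrite author's own statement) =====
-- stated objective: alternative
-- what changed: Replaced the 9 full scans of pos_preenchidas (one per row) by a single pass that maintains a dict from row index to the set of values already seen in that row.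
import Mathlib
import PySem

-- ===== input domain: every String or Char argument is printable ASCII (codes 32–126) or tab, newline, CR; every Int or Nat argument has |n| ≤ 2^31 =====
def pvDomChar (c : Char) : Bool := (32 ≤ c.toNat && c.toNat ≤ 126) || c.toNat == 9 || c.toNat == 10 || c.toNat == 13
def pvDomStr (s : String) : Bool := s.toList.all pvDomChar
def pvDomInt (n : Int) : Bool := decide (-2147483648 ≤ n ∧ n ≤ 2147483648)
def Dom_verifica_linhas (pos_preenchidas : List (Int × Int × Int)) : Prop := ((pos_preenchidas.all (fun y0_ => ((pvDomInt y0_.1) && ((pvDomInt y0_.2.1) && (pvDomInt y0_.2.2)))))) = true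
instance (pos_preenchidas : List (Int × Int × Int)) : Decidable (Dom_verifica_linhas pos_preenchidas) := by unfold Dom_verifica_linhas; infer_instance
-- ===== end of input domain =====

-- B makes a single pass with a dict row-to-seen-values instead of A's nine full scans (one per row); alternative structure, same result.

-- ===== PORT A =====
-- inner loop: `for item in pos_preenchidas` for a fixed `linha`, with early `return False`
def vlInner (linha : Int) (items : List (Int × Int × Int)) (vistos : PySem.Set Int) : Bool :=
  match items with
  | [] => true
  | item :: rest =>
    if item.2.1 = linha then
      let valor := item.2.2
      if PySem.Set.contains vistos valor then false
      else vlInner linha rest (PySem.Set.add vistos valor)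
    else vlInner linha rest vistos

-- outer loop: `for linha in range(9)`, propagating the early return
def vlOuter (rows : List Int) (items : List (Int × Int × Int)) : Bool :=
  match rows with
  | [] => true
  | r :: rs => if vlInner r items PySem.Set.empty then vlOuter rs items else false

def verifica_linhas (pos_preenchidas : List (Int × Int × Int)) : Bool :=
  vlOuter (PySem.List.pyRange 0 9 1) pos_preenchidas

-- ===== PORT B =====
-- single pass: `vistos` is a dict row ↦ set of values already seen in that row
def vlGo (items : List (Int × Int × Int)) (vistos : PySem.Dict Int (PySem.Set Int)) : Bool :=
  match items with
  | [] => true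
  | item :: rest =>
    if 0 ≤ item.2.1 ∧ item.2.1 < 9 then
      let s := vistos.getD item.2.1 PySem.Set.empty
      if PySem.Set.contains s item.2.2 then false
      else vlGo rest (vistos.insert item.2.1 (PySem.Set.add s item.2.2))
    else vlGo rest vistos

def verifica_linhas_alt (pos_preenchidas : List (Int × Int × Int)) : Bool :=
  vlGo pos_preenchidas PySem.Dict.empty

-- ===== PRECONDITION & SPEC =====
def Spec_verifica_linhas (pos_preenchidas : List (Int × Int × Int)) (out : Bool) : Prop := out = verifica_linhas_alt pos_preenchidas
instance (pos_preenchidas : List (Int × Int × Int)) (out : Bool) : Decidable (Spec_verifica_linhas pos_preenchidas out) := by unfold Spec_verifica_linhas; infer_instance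

-- ===== CLAIM (what is proved, stated in full; the proofs are below) =====
def Claim_equal_verifica_linhas : Prop := ∀ (pos_preenchidas : List (Int × Int × Int)), Dom_verifica_linhas pos_preenchidas → Spec_verifica_linhas pos_preenchidas (verifica_linhas pos_preenchidas)

-- ===== LEMMAS AND PROOFS =====

-- the values filled into row r, in list order
def rowVals (r : Int) (items : List (Int × Int × Int)) : List Int :=
  (items.filter (fun it => it.2.1 = r)).map (·.2.2)

theorem rowVals_nil (r : Int) : rowVals r [] = [] := rfl

theorem rowVals_cons (r : Int) (it : Int × Int × Int) (rest : List (Int × Int × Int)) :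
    rowVals r (it :: rest) = if it.2.1 = r then it.2.2 :: rowVals r rest else rowVals r rest := by
  by_cases h : it.2.1 = r <;> simp [rowVals, h]

-- one fresh value c moved from the accumulator set into the spec, shared by both loop invariants
theorem addStep (c : Int) (R : List Int) (s : PySem.Set Int) (hns : c ∉ s) :
    (R.Nodup ∧ ∀ v ∈ R, v ∉ PySem.Set.add s c) ↔ ((c :: R).Nodup ∧ ∀ v ∈ c :: R, v ∉ s) := by
  simp only [List.nodup_cons, List.mem_cons, forall_eq_or_imp, PySem.Set.mem_add, not_or]
  constructor
  · rintro ⟨hnd, hall⟩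
    exact ⟨⟨fun hm => (hall c hm).2 rfl, hnd⟩, hns, fun v hv => (hall v hv).1⟩
  · rintro ⟨⟨hcR, hnd⟩, _, hall⟩
    exact ⟨hnd, fun v hv => ⟨hall v hv, fun he => hcR (he ▸ hv)⟩⟩

theorem vlInner_iff (r : Int) (items : List (Int × Int × Int)) (s : PySem.Set Int) :
    vlInner r items s = true ↔
      (rowVals r items).Nodup ∧ ∀ v ∈ rowVals r items, v ∉ s := by
  induction items generalizing s with
  | nil => simp [vlInner, rowVals_nil]
  | cons it rest ih =>
    rw [rowVals_cons]
    by_cases h : it.2.1 = r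
    · rw [if_pos h]
      simp only [vlInner, if_pos h]
      by_cases hc : PySem.Set.contains s it.2.2
      · rw [if_pos hc]
        have hm : it.2.2 ∈ s := by simpa [PySem.Set.contains] using hc
        simp only [Bool.false_eq_true, false_iff]
        rintro ⟨-, hall⟩
        exact hall it.2.2 (List.mem_cons_self ..) hm
      · rw [if_neg hc, ih]
        have hns : it.2.2 ∉ s := by simpa [PySem.Set.contains] using hc
        exact addStep it.2.2 (rowVals r rest) s hns
    · rw [if_neg h]
      simp only [vlInner, if_neg h]
      exact ih s

theorem vlOuter_iff (rows : List Int) (items : List (Int × Int × Int)) :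
    vlOuter rows items = true ↔ ∀ r ∈ rows, vlInner r items PySem.Set.empty = true := by
  induction rows with
  | nil => simp [vlOuter]
  | cons r rs ih =>
    by_cases h : vlInner r items PySem.Set.empty = true <;>
      simp [vlOuter, h, ih]

theorem vlGo_iff (items : List (Int × Int × Int)) (d : PySem.Dict Int (PySem.Set Int)) :
    vlGo items d = true ↔
      ∀ r : Int, 0 ≤ r → r < 9 →
        (rowVals r items).Nodup ∧ ∀ v ∈ rowVals r items, v ∉ d.getD r PySem.Set.empty := by
  induction items generalizing d with
  | nil => simp [vlGo, rowVals_nil]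
  | cons it rest ih =>
    by_cases h9 : 0 ≤ it.2.1 ∧ it.2.1 < 9
    · simp only [vlGo, if_pos h9]
      by_cases hc : PySem.Set.contains (d.getD it.2.1 PySem.Set.empty) it.2.2
      · rw [if_pos hc]
        have hm : it.2.2 ∈ d.getD it.2.1 PySem.Set.empty := by
          simpa [PySem.Set.contains] using hc
        simp only [Bool.false_eq_true, false_iff]
        intro hall
        exact (hall it.2.1 h9.1 h9.2).2 it.2.2
          (by rw [rowVals_cons, if_pos rfl]; exact List.mem_cons_self ..) hm
      · rw [if_neg hc, ih]
        have hns : it.2.2 ∉ d.getD it.2.1 PySem.Set.empty := by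
          simpa [PySem.Set.contains] using hc
        constructor
        · intro hall r h0 hr
          have hx := hall r h0 hr
          rw [PySem.Dict.getD_insert] at hx
          rw [rowVals_cons]
          by_cases hrb : r = it.2.1
          · subst hrb
            rw [if_pos rfl] at hx
            rw [if_pos rfl]
            exact (addStep it.2.2 (rowVals it.2.1 rest) _ hns).mp hx
          · rw [if_neg hrb] at hx
            rwa [if_neg (fun he => hrb he.symm)]
        · intro hall r h0 hr
          have hx := hall r h0 hr
          rw [rowVals_cons] at hx
          rw [PySem.Dict.getD_insert]
          by_cases hrb : r = it.2.1
          · subst hrb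
            rw [if_pos rfl] at hx
            rw [if_pos rfl]
            exact (addStep it.2.2 (rowVals it.2.1 rest) _ hns).mpr hx
          · rw [if_neg hrb]
            rwa [if_neg (fun he => hrb he.symm)] at hx
    · simp only [vlGo, if_neg h9]
      rw [ih]
      constructor <;> intro hall r h0 hr <;>
      · have hne : it.2.1 ≠ r := fun he => h9 (he ▸ ⟨h0, hr⟩)
        have hx := hall r h0 hr
        first
        | rwa [rowVals_cons, if_neg hne]
        | rwa [rowVals_cons, if_neg hne] at hx

theorem verifica_linhas_eq (items : List (Int × Int × Int)) :
    verifica_linhas items = verifica_linhas_alt items := by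
  rw [Bool.eq_iff_iff]
  unfold verifica_linhas verifica_linhas_alt
  rw [vlOuter_iff, vlGo_iff]
  constructor
  · intro hall r h0 hr
    have hx := (vlInner_iff r items PySem.Set.empty).mp
      (hall r (by rw [PySem.List.mem_pyRange_one]; omega))
    refine ⟨hx.1, fun v _ => ?_⟩
    simp [PySem.Dict.getD, PySem.Dict.get?, PySem.Dict.empty]
  · intro hall r hr
    rw [PySem.List.mem_pyRange_one] at hr
    rw [vlInner_iff]
    exact ⟨(hall r hr.1 hr.2).1, fun v _ => by simp [PySem.Set.empty]⟩

-- ===== VERDICT (by name: the statement is the Claim_ definition above) =====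
theorem verifica_linhas_spec : Claim_equal_verifica_linhas := by
  intro items _
  exact verifica_linhas_eq items
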